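-- pv_equiv track=rewrite | github.com/david16260/gestor_documental | app/services/documentos_url_service.py | detect_google_file_type
-- ===== SOURCE A (Python) =====
-- def detect_google_file_type(url: str):
--     """
--     Detecta el tipo de archivo de Google y retorna el formato de exportación apropiado
--     """
--     if "spreadsheets" in url or "spreadsheet" in url:
--         return "xlsx"
--     elif "document" in url:
--         return "pdf"
--     elif "presentation" in url or "slides" in url:
--         return "pdf"
--     elif "drive.google.com" in url:
--         if any(ext in url.lower() for ext in ['.xlsx', '.xls', '.csv']):
--             return "xlsx"
--         elif any(ext in url.lower() for ext in ['.doc', '.docx', '.pdf']):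
--             return "pdf"
--     return "pdf"
-- ===== SOURCE B (Python) =====
-- # Table-driven: a rule table scanned once for keyword matches, then a
-- # separate extension scan for the drive case; default pdf.
-- _RULES = [
--     ("spreadsheet", "xlsx"),
--     ("document", "pdf"),
--     ("presentation", "pdf"),
--     ("slides", "pdf"),
-- ]
--
-- def _first_rule(url, rules):
--     if not rules:
--         return None
--     kw, fmt = rules[0]
--     if kw in url:
--         return fmt
--     return _first_rule(url, rules[1:])
--
-- def _has_ext(low, exts):
--     if not exts:
--         return False
--     if exts[0] in low:
--         return True
--     return _has_ext(low, exts[1:])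
--
-- def detect_google_file_type(url: str):
--     hit = _first_rule(url, _RULES)
--     if hit is not None:
--         return hit
--     if "drive.google.com" in url and _has_ext(url.lower(), [".xlsx", ".xls", ".csv"]):
--         return "xlsx"
--     return "pdf"
-- ===== Notes on version B (the rewrite author's own statement) =====
-- stated objective: alternative
-- what changed: Replaced the hard-coded nested if-cascade by a table-driven design: a recursive scan over a keyword->format rule table (a single 'spreadsheet' entry subsumes its plural, the redundant drive doc-extension branch that only re-derived the default pdf is deleted), followed by one recursive extension scan for the drive case.
import Mathlib
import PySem

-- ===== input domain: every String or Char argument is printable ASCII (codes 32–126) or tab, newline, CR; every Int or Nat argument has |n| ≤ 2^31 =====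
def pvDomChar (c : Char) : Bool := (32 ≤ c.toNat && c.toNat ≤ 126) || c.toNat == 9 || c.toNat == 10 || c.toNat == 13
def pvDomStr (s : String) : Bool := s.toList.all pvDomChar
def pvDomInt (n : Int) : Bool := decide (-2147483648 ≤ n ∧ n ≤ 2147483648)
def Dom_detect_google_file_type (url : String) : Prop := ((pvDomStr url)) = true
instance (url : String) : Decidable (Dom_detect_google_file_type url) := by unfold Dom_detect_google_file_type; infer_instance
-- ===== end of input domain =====

-- B replaces A's nested if-cascade with a table-driven scan over a keyword rule list;
-- same return value everywhere, objective: alternative decomposition.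
-- ===== PORT A =====
def detect_google_file_type (url : String) : String :=
  if PySem.Str.isIn "spreadsheets" url || PySem.Str.isIn "spreadsheet" url then "xlsx"
  else if PySem.Str.isIn "document" url then "pdf"
  else if PySem.Str.isIn "presentation" url || PySem.Str.isIn "slides" url then "pdf"
  else if PySem.Str.isIn "drive.google.com" url then
    if [".xlsx", ".xls", ".csv"].any (fun ext => PySem.Str.isIn ext (PySem.Str.lower url)) then "xlsx"
    else if [".doc", ".docx", ".pdf"].any (fun ext => PySem.Str.isIn ext (PySem.Str.lower url)) then "pdf"
    else "pdf"
  else "pdf"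

-- ===== PORT B =====
-- recursive scan over the rule table: first keyword found in url yields its format
def pvFirstRule (url : String) : List (String × String) → Option String
  | [] => none
  | (kw, fmt) :: rest => if PySem.Str.isIn kw url then some fmt else pvFirstRule url rest

-- recursive scan: does any extension of the list occur in the lowered url?
def pvHasExt (low : String) : List String → Bool
  | [] => false
  | e :: rest => if PySem.Str.isIn e low then true else pvHasExt low rest

def pvRules : List (String × String) :=
  [("spreadsheet", "xlsx"), ("document", "pdf"), ("presentation", "pdf"), ("slides", "pdf")]

def detect_google_file_type_alt (url : String) : String :=
  match pvFirstRule url pvRules with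
  | some fmt => fmt
  | none =>
    if PySem.Str.isIn "drive.google.com" url
        && pvHasExt (PySem.Str.lower url) [".xlsx", ".xls", ".csv"] then "xlsx"
    else "pdf"

-- ===== PRECONDITION & SPEC =====
def Spec_detect_google_file_type (url : String) (out : String) : Prop := out = detect_google_file_type_alt url
instance (url : String) (out : String) : Decidable (Spec_detect_google_file_type url out) := by unfold Spec_detect_google_file_type; infer_instance

-- ===== CLAIM (what is proved, stated in full; the proofs are below) =====
def Claim_equal_detect_google_file_type : Prop := ∀ (url : String), Dom_detect_google_file_type url → Spec_detect_google_file_type url (detect_google_file_type url)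

-- ===== LEMMAS AND PROOFS =====
-- 'spreadsheets' in url implies 'spreadsheet' in url ('spreadsheet' is an infix of 'spreadsheets')
theorem isIn_spreadsheets_imp (url : String)
    (h : PySem.Str.isIn "spreadsheets" url = true) :
    PySem.Str.isIn "spreadsheet" url = true := by
  rw [PySem.Str.isIn_iff_infix] at h ⊢
  exact List.IsInfix.trans (by decide) h

-- ===== VERDICT (by name: the statement is the Claim_ definition above) =====
theorem detect_google_file_type_spec : Claim_equal_detect_google_file_type := by
  intro url _
  unfold Spec_detect_google_file_type detect_google_file_type detect_google_file_type_alt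
  simp only [pvRules, pvFirstRule, pvHasExt, List.any_cons, List.any_nil, Bool.or_false]
  have h := isIn_spreadsheets_imp url
  generalize PySem.Str.isIn "spreadsheets" url = a at h ⊢
  generalize PySem.Str.isIn "spreadsheet" url = b at h ⊢
  generalize PySem.Str.isIn "document" url = c
  generalize PySem.Str.isIn "presentation" url = d
  generalize PySem.Str.isIn "slides" url = e
  generalize PySem.Str.isIn "drive.google.com" url = f
  generalize PySem.Str.isIn ".xlsx" (PySem.Str.lower url) = g
  generalize PySem.Str.isIn ".xls" (PySem.Str.lower url) = i
  generalize PySem.Str.isIn ".csv" (PySem.Str.lower url) = j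
  generalize PySem.Str.isIn ".doc" (PySem.Str.lower url) = k
  generalize PySem.Str.isIn ".docx" (PySem.Str.lower url) = l
  generalize PySem.Str.isIn ".pdf" (PySem.Str.lower url) = m
  revert h
  revert a b c d e f g i j k l m
  decide
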